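-- pv_equiv track=rewrite | github.com/sbaselice1/search-intelligence-platform | aio_monitor/serp_checker.py | _is_google_internal
-- ===== SOURCE A (Python) =====
-- def _is_google_internal(domain: str) -> bool:
--     """Check if a domain is a Google internal domain."""
--     google_domains = {
--         "google.com", "google.co.uk", "google.ca",
--         "gstatic.com", "googleapis.com", "googleusercontent.com",
--         "googlesyndication.com", "googleadservices.com",
--         "youtube.com", "youtu.be", "yt.be",
--         "accounts.google.com", "support.google.com",
--         "maps.google.com", "play.google.com",
--     }
--     return any(domain == gd or domain.endswith(f".{gd}") for gd in google_domains)
-- ===== SOURCE B (Python) =====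
-- def _is_google_internal(domain: str) -> bool:
--     """Check if a domain is a Google internal domain."""
--     google_domains = {
--         "google.com", "google.co.uk", "google.ca",
--         "gstatic.com", "googleapis.com", "googleusercontent.com",
--         "googlesyndication.com", "googleadservices.com",
--         "youtube.com", "youtu.be", "yt.be",
--         "accounts.google.com", "support.google.com",
--         "maps.google.com", "play.google.com",
--     }
--     # Walk the input's own dot-suffixes: look the current suffix up in the
--     # set, then strip the leading label and repeat.
--     suffix = domain
--     while True:
--         if suffix in google_domains:
--             return True
--         _, sep, suffix = suffix.partition(".")
--         if not sep:
--             return False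
-- ===== Notes on version B (the rewrite author's own statement) =====
-- stated objective: alternative
-- what changed: Instead of scanning the whole pattern set and running an endswith suffix test per pattern, B walks the input's own suffixes at dot boundaries (repeatedly stripping the leading label) and does one set-membership lookup per label.
import Mathlib
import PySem

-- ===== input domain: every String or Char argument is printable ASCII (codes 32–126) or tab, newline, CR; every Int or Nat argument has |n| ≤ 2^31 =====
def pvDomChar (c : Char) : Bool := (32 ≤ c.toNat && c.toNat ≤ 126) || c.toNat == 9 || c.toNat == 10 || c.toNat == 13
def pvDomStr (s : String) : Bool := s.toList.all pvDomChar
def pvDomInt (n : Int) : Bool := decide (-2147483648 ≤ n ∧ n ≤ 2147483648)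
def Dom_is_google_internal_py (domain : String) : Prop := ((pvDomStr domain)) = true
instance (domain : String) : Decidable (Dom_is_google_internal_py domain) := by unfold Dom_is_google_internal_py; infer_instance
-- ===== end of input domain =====

-- B walks the input's own dot-suffixes doing set lookups instead of scanning the pattern set with endswith tests (alternative decomposition, same return value).


-- the literal set of Google domains, identical in A and B
def pvGoogleDomains : List String :=
  ["google.com", "google.co.uk", "google.ca",
   "gstatic.com", "googleapis.com", "googleusercontent.com",
   "googlesyndication.com", "googleadservices.com",
   "youtube.com", "youtu.be", "yt.be",
   "accounts.google.com", "support.google.com",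
   "maps.google.com", "play.google.com"]

-- ===== PORT A =====
-- any(domain == gd or domain.endswith(f".{gd}") for gd in google_domains)
-- (any over a Python set: the result is order-independent, so iterating the Set's list is exact)
def is_google_internal_py (domain : String) : Bool :=
  (PySem.Set.ofList pvGoogleDomains).any
    (fun gd => domain == gd || PySem.Str.endswith domain ("." ++ gd))

-- ===== PORT B =====
-- the same set, as char lists (membership lookup table)
def pvTable : List (List Char) := pvGoogleDomains.map String.toList

-- the while-loop of B: check the current suffix, then strip the leading label
-- (suffix.partition(".")[2] = the tail after the first '.', i.e. tail of dropWhile (≠ '.'))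
def pvStripLoop (suffix : List Char) : Bool :=
  if pvTable.contains suffix then true
  else
    match _h : suffix.dropWhile (fun c => !(c == '.')) with
    | [] => false
    | _ :: rest => pvStripLoop rest
termination_by suffix.length
decreasing_by
  have hle := List.length_dropWhile_le (fun c => !(c == '.')) suffix
  rw [_h] at hle; simp at hle; omega

def is_google_internal_py_alt (domain : String) : Bool := pvStripLoop domain.toList

-- ===== PRECONDITION & SPEC =====
def Spec_is_google_internal_py (domain : String) (out : Bool) : Prop := out = is_google_internal_py_alt domain
instance (domain : String) (out : Bool) : Decidable (Spec_is_google_internal_py domain out) := by unfold Spec_is_google_internal_py; infer_instance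

-- ===== CLAIM (what is proved, stated in full; the proofs are below) =====
def Claim_equal_is_google_internal_py : Prop := ∀ (domain : String), Dom_is_google_internal_py domain → Spec_is_google_internal_py domain (is_google_internal_py domain)

-- ===== LEMMAS AND PROOFS =====

-- A's per-pattern test, on char lists
def pvHit (cs gd : List Char) : Bool := cs == gd || PySem.Chars.endswith cs ('.' :: gd)

def pvAnyTbl (cs : List Char) : Bool := pvTable.any (pvHit cs)

lemma pvA_eq (domain : String) : is_google_internal_py domain = pvAnyTbl domain.toList := by
  have hset : PySem.Set.ofList pvGoogleDomains = pvGoogleDomains := by decide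
  unfold is_google_internal_py pvAnyTbl pvTable
  rw [hset, List.any_map]
  apply PySem.List.any_congr_mem
  intro gd _
  unfold pvHit
  congr 1
  · rw [Bool.eq_iff_iff]; simp [String.toList_inj]
  · rw [PySem.Str.endswith_eq]
    congr 1
    simp

-- a suffix starting with '.' of pre ++ '.'::rest with pre dot-free is a suffix of '.'::rest
lemma pvSuffixDot (pre rest l : List Char) (hpre : ∀ x ∈ pre, ¬ x = '.') :
    ('.' :: l <:+ pre ++ '.' :: rest) ↔ ('.' :: l <:+ '.' :: rest) := by
  constructor
  · intro hsuf
    by_cases hlen : ('.' :: l).length ≤ ('.' :: rest).length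
    · exact List.suffix_of_suffix_length_le hsuf (List.suffix_append pre ('.' :: rest)) hlen
    · exfalso
      have hsub : '.' :: rest <:+ '.' :: l :=
        List.suffix_of_suffix_length_le (List.suffix_append pre ('.' :: rest)) hsuf (Nat.le_of_lt (Nat.lt_of_not_le hlen))
      obtain ⟨front, hfront⟩ := hsub
      obtain ⟨t, ht⟩ := hsuf
      have hfne : front ≠ [] := by
        intro h0; rw [h0] at hfront; simp at hfront
        exact hlen (by simp [hfront])
      obtain ⟨f0, ftail, rfl⟩ := List.exists_cons_of_ne_nil hfne
      have hf0 : f0 = '.' := by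
        have := hfront; simp at this; exact this.1
      have hpreeq : t ++ (f0 :: ftail) = pre := by
        have : (t ++ (f0 :: ftail)) ++ '.' :: rest = pre ++ '.' :: rest := by
          rw [List.append_assoc, hfront, ht]
        exact List.append_cancel_right this
      have : f0 ∈ pre := by rw [← hpreeq]; simp
      exact hpre f0 this hf0
  · intro hsuf
    exact hsuf.trans (List.suffix_append pre ('.' :: rest))

lemma pvMemTable_of_contains {cs : List Char} (h : pvTable.contains cs = true) : cs ∈ pvTable := by
  simpa using h

lemma pvStripLoop_eq (cs : List Char) : pvStripLoop cs = pvAnyTbl cs := by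
  fun_induction pvStripLoop cs with
  | case1 cs hc =>
      have hmem : cs ∈ pvTable := pvMemTable_of_contains hc
      have : pvAnyTbl cs = true := by
        unfold pvAnyTbl
        exact List.any_eq_true.2 ⟨cs, hmem, by simp [pvHit]⟩
      exact this.symm
  | case2 cs hc hdrop =>
      have hnodot : ∀ x ∈ cs, ¬ x = '.' := by
        intro x hx
        have := (List.dropWhile_eq_nil_iff.1 hdrop) x hx
        simpa using this
      have hnm : cs ∉ pvTable := by simpa using hc
      have : pvAnyTbl cs = false := by
        unfold pvAnyTbl
        rw [List.any_eq_false]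
        intro gd hgd
        unfold pvHit
        simp only [Bool.or_eq_true, not_or]
        constructor
        · intro hbeq
          have hcg : cs = gd := by simpa using hbeq
          exact hnm (hcg ▸ hgd)
        · intro hew
          have hsuf : '.' :: gd <:+ cs := (PySem.Chars.endswith_iff cs ('.' :: gd)).1 hew
          exact hnodot '.' (hsuf.subset (by simp)) rfl
      exact this.symm
  | case3 cs hc c rest hdrop ih =>
      rw [ih]
      have hcdot : c = '.' := by
        have := List.head?_dropWhile_not (fun c => !(c == '.')) cs
        rw [hdrop] at this
        simpa using this
      subst hcdot
      have hsplit : cs.takeWhile (fun c => !(c == '.')) ++ '.' :: rest = cs := by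
        conv_rhs => rw [← List.takeWhile_append_dropWhile (p := fun c => !(c == '.')) (l := cs)]
        rw [hdrop]
      have hpre : ∀ x ∈ cs.takeWhile (fun c => !(c == '.')), ¬ x = '.' := by
        intro x hx
        have := List.mem_takeWhile_imp hx
        simpa using this
      have hnotmem : cs ∉ pvTable := by simpa using hc
      unfold pvAnyTbl
      apply PySem.List.any_congr_mem
      intro gd hgd
      unfold pvHit
      have hne : (cs == gd) = false := by
        rw [beq_eq_false_iff_ne]
        intro h'
        exact hnotmem (h' ▸ hgd)
      rw [hne, Bool.false_or]
      rw [Bool.eq_iff_iff]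
      simp only [Bool.or_eq_true, PySem.Chars.endswith_iff, beq_iff_eq]
      rw [← hsplit, pvSuffixDot _ _ _ hpre, List.suffix_cons_iff]
      simp [eq_comm]

-- ===== VERDICT (by name: the statement is the Claim_ definition above) =====
theorem is_google_internal_py_spec : Claim_equal_is_google_internal_py := by
  intro domain _
  unfold Spec_is_google_internal_py is_google_internal_py_alt
  rw [pvA_eq, pvStripLoop_eq]
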